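-- pv_equiv track=rewrite | github.com/kathanparikh03/Project_3_Working_With_Data | main.py | get_state_population
-- ===== SOURCE A (Python) =====
-- def get_state_population(state_populations, state_name):
--   ''' gets and returns the state population from "https://raw.githubusercontent.com/heymrhayes/class_files/main/state_populations_2018.txt"
--       when a state name is entered as an argument '''
--   # runs a for loop to store the key without the '.' and its value in a list
--   state_population_lis = []
--   for item in state_populations:
--     for key in item:
--       state_population_lis.append([key[1:], item[key]])
--     # runs a for loop again to return the state population
--     for item in state_population_lis:
--       if state_name in item:
--         return item[1]
-- ===== SOURCE B (Python) =====
-- def get_state_population(state_populations, state_name):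
--     ''' single pass: return the value of the first key whose name (without its
--         leading character) equals state_name; no intermediate list, no rescans '''
--     return next((value
--                  for item in state_populations
--                  for key, value in item.items()
--                  if key[1:] == state_name),
--                 None)
-- ===== Notes on version B (the rewrite author's own statement) =====
-- stated objective: faster
-- what changed: B is a single generator pass over the dicts returning the first matching value, instead of A's growing intermediate list that is fully rescanned after every dict; the dead value-match branch (str vs int is always False) is dropped.
import Mathlib
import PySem

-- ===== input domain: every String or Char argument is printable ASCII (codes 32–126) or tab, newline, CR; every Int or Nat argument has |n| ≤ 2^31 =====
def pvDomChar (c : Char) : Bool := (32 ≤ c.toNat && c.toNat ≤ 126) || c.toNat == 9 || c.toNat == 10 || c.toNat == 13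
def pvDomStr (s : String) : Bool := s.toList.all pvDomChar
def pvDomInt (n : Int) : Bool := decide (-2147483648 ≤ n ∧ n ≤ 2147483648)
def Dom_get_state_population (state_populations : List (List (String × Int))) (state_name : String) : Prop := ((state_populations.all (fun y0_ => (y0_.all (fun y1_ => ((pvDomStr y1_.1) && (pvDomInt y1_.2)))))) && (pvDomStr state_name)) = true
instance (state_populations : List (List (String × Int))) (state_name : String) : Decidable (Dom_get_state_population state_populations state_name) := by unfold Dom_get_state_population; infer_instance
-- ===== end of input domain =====

-- ===== PORT A =====
-- One honest line: B replaces A's growing intermediate list (rescanned in full after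
-- every dict) by a single first-match pass; objective: simpler. Return-value equivalence.
-- `state_name in [key[1:], item[key]]`: the second member is an int, a str never equals
-- an int in Python, so the membership test is ported as equality with the trimmed key.
-- `for key in item` + `item[key]` over a Python dict is iteration over its items.
def pvTrim (k : String) : String := PySem.Str.slice k (some 1) none  -- key[1:]

def pvGoA (state_name : String) : List (List (String × Int)) → List (String × Int) → Option Int
  | [], _ => none
  | item :: rest, lis =>
    let lis2 := lis ++ (PySem.Dict.ofList item).items.map (fun p => (pvTrim p.1, p.2))
    match lis2.find? (fun q => state_name == q.1) with
    | some q => some q.2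
    | none => pvGoA state_name rest lis2

def get_state_population (state_populations : List (List (String × Int))) (state_name : String) : Option Int :=
  pvGoA state_name state_populations []

-- ===== PORT B =====
def get_state_population_alt (state_populations : List (List (String × Int))) (state_name : String) : Option Int :=
  state_populations.findSome? (fun item =>
    (PySem.Dict.ofList item).items.findSome? (fun p =>
      if pvTrim p.1 == state_name then some p.2 else none))

-- ===== PRECONDITION & SPEC =====
def Spec_get_state_population (state_populations : List (List (String × Int))) (state_name : String) (out : Option Int) : Prop := out = get_state_population_alt state_populations state_name
instance (state_populations : List (List (String × Int))) (state_name : String) (out : Option Int) : Decidable (Spec_get_state_population state_populations state_name out) := by unfold Spec_get_state_population; infer_instance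

-- ===== CLAIM (what is proved, stated in full; the proofs are below) =====
def Claim_equal_get_state_population : Prop := ∀ (state_populations : List (List (String × Int))) (state_name : String), Dom_get_state_population state_populations state_name → Spec_get_state_population state_populations state_name (get_state_population state_populations state_name)

-- ===== LEMMAS AND PROOFS =====
theorem pvInner (state_name : String) (l : List (String × Int)) :
    ((l.map (fun p => (pvTrim p.1, p.2))).find? (fun q => state_name == q.1)).map (·.2)
      = l.findSome? (fun p => if pvTrim p.1 == state_name then some p.2 else none) := by
  induction l with
  | nil => rfl
  | cons p l ih =>
    simp only [List.map_cons, List.find?_cons, List.findSome?_cons]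
    by_cases h : pvTrim p.1 = state_name
    · simp [h]
    · have h1 : (state_name == pvTrim p.1) = false := by simp [Ne.symm h]
      have h2 : (pvTrim p.1 == state_name) = false := by simp [h]
      simp only [List.find?_map] at ih
      simp [h1, h2, List.find?_map, ih]

theorem pvGoA_eq (state_name : String) (sp : List (List (String × Int)))
    (lis : List (String × Int)) (h : lis.find? (fun q => state_name == q.1) = none) :
    pvGoA state_name sp lis = get_state_population_alt sp state_name := by
  induction sp generalizing lis with
  | nil => rfl
  | cons item rest ih =>
    simp only [pvGoA, get_state_population_alt, List.findSome?_cons]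
    rw [List.find?_append, h, Option.none_or]
    have hin := pvInner state_name (PySem.Dict.ofList item).items
    cases hf : ((PySem.Dict.ofList item).items.map (fun p => (pvTrim p.1, p.2))).find?
        (fun q => state_name == q.1) with
    | none =>
      rw [hf] at hin
      simp only [Option.map_none] at hin
      rw [← hin]
      exact ih _ (by rw [List.find?_append, h, Option.none_or, hf])
    | some q =>
      rw [hf] at hin
      simp only [Option.map_some] at hin
      rw [← hin]

-- ===== VERDICT (by name: the statement is the Claim_ definition above) =====
theorem get_state_population_spec : Claim_equal_get_state_population := by
  intro sp name _
  unfold Spec_get_state_population get_state_population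
  exact pvGoA_eq name sp [] rfl
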